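-- pv_equiv track=rewrite | github.com/JGarnerDev/learning-python | maxMinArray.py | solve
-- ===== SOURCE A (Python) =====
-- def solve(arr):
--     ans = []
--
--     while len(arr) > 0:
--         max_val = max(arr)
--         min_val = min(arr)
--         ans.append(max_val)
--         arr.remove(max_val)
--         if len(arr) > 1:
--             ans.append(min_val)
--             arr.remove(min_val)
--
--     return ans
-- ===== SOURCE B (Python) =====
-- def solve(arr):
--     s = sorted(arr)
--     ans = []
--     lo, hi = 0, len(s) - 1
--     take_max = True
--     while lo <= hi:
--         if take_max:
--             ans.append(s[hi])
--             hi -= 1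
--         else:
--             ans.append(s[lo])
--             lo += 1
--         take_max = not take_max
--     return ans
-- ===== Notes on version B (the rewrite author's own statement) =====
-- stated objective: faster
-- what changed: B sorts once and emits the answer with two index pointers walking inward from the ends of the sorted list, instead of rescanning the remaining list for max and min and removing them on every iteration.
import Mathlib
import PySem

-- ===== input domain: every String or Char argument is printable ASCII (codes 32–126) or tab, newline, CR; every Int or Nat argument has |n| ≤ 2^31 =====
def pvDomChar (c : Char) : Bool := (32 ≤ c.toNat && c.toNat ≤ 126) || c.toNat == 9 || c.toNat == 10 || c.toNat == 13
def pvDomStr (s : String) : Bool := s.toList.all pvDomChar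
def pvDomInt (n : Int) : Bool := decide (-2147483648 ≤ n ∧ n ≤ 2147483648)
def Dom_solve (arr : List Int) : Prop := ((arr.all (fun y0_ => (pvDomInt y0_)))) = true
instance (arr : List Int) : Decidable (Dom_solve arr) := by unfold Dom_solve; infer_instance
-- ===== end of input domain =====

-- B sorts once and walks two index pointers inward from the ends of the sorted list (O(n log n))
-- instead of rescanning the remaining list for max/min and removing them each iteration; the
-- equivalence is about the return value only (the Python A empties its argument list in place,
-- B leaves it untouched).

-- ===== PORT A =====
-- termination helper for the port: a successful remove shortens the list by one
theorem pvRemoveLen {xs ys : List Int} {v : Int}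
    (h : PySem.List.remove? xs v = some ys) : ys.length + 1 = xs.length := by
  have hv : v ∈ xs := by
    by_contra hv
    rw [(PySem.List.remove?_eq_none_iff xs v).mpr hv] at h
    cases h
  rw [PySem.List.remove?_eq_some_erase xs v hv, Option.some.injEq] at h
  subst h
  have h1 := List.length_erase_of_mem hv
  have h2 := List.length_pos_of_mem hv
  omega

def solveLoop (arr : List Int) (ans : List Int) : List Int :=
  if _h : arr.length > 0 then
    match PySem.List.max? arr (fun y => y), PySem.List.min? arr (fun y => y) with
    | some mxv, some mnv =>
      match hr : PySem.List.remove? arr mxv with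
      | some arr1 =>
        if arr1.length > 1 then
          match hr2 : PySem.List.remove? arr1 mnv with
          | some arr2 => solveLoop arr2 (ans ++ [mxv] ++ [mnv])
          | none => ans ++ [mxv] ++ [mnv]   -- unreachable: mnv is present when > 1 remain
        else solveLoop arr1 (ans ++ [mxv])
      | none => ans ++ [mxv]                -- unreachable: mxv ∈ arr
    | _, _ => ans                           -- unreachable: arr is nonempty here
  else ans
termination_by arr.length
decreasing_by
  · have := pvRemoveLen hr; have := pvRemoveLen hr2; omega
  · have := pvRemoveLen hr; omega

def solve (arr : List Int) : List Int := solveLoop arr []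

-- ===== PORT B =====
def solveAltLoop (s : List Int) (lo hi : Int) (takeMax : Bool) (ans : List Int) : List Int :=
  if _h : lo ≤ hi then
    if takeMax then
      match PySem.List.pyGet? s hi with
      | some v => solveAltLoop s lo (hi - 1) (!takeMax) (ans ++ [v])
      | none => ans   -- unreachable: 0 ≤ lo ≤ hi < len s at every call
    else
      match PySem.List.pyGet? s lo with
      | some v => solveAltLoop s (lo + 1) hi (!takeMax) (ans ++ [v])
      | none => ans   -- unreachable
  else ans
termination_by (hi + 1 - lo).toNat
decreasing_by all_goals omega

def solve_alt (arr : List Int) : List Int :=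
  let s := PySem.List.sorted arr (fun y => y) false
  solveAltLoop s 0 ((s.length : Int) - 1) true []

-- ===== PRECONDITION & SPEC =====
def Spec_solve (arr : List Int) (out : List Int) : Prop := out = solve_alt arr
instance (arr : List Int) (out : List Int) : Decidable (Spec_solve arr out) := by unfold Spec_solve; infer_instance

-- ===== CLAIM (what is proved, stated in full; the proofs are below) =====
def Claim_equal_solve : Prop := ∀ (arr : List Int), Dom_solve arr → Spec_solve arr (solve arr)

-- ===== LEMMAS AND PROOFS =====

theorem pvRemoveEq {xs ys : List Int} {v : Int}
    (h : PySem.List.remove? xs v = some ys) : v ∈ xs ∧ ys = xs.erase v := by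
  have hv : v ∈ xs := by
    by_contra hv
    rw [(PySem.List.remove?_eq_none_iff xs v).mpr hv] at h
    cases h
  rw [PySem.List.remove?_eq_some_erase xs v hv, Option.some.injEq] at h
  exact ⟨hv, h.symm⟩

-- A's loop, without the accumulator: take the max, and (if > 1 elements remain) also the min
def canon (s : List Int) : List Int :=
  match hm : PySem.List.max? s (fun y => y), PySem.List.min? s (fun y => y) with
  | some mx, some mn =>
    if _h1 : (s.erase mx).length > 1 then
      mx :: mn :: canon ((s.erase mx).erase mn)
    else
      mx :: canon (s.erase mx)
  | _, _ => []
termination_by s.length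
decreasing_by
  · have hmem := PySem.List.max?_mem hm
    have h1 := List.length_erase_of_mem hmem
    have h2 := List.length_erase_le (l := s.erase mx) (a := mn)
    have h3 := List.length_pos_of_mem hmem
    omega
  · have hmem := PySem.List.max?_mem hm
    have h1 := List.length_erase_of_mem hmem
    have h3 := List.length_pos_of_mem hmem
    omega

-- B's traversal, without the accumulator: alternately the last and the first element
def bp (t : List Int) (takeMax : Bool) : List Int :=
  match t with
  | [] => []
  | x :: xs =>
    if takeMax then (x :: xs).getLast (by simp) :: bp (x :: xs).dropLast false
    else x :: bp xs true
termination_by t.length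
decreasing_by
  · simp
  · simp

theorem bp_nil (tm : Bool) : bp [] tm = [] := by rw [bp]

theorem bp_cons_false (x : Int) (xs : List Int) : bp (x :: xs) false = x :: bp xs true := by
  rw [bp]; simp

theorem bp_true_eq (t : List Int) (ht : t ≠ []) :
    bp t true = t.getLast ht :: bp t.dropLast false := by
  match t with
  | x :: xs => rw [bp]; simp

-- if fewer than two elements remain, whose turn it is does not matter
theorem bp_small (t : List Int) (h : t.length ≤ 1) : bp t false = bp t true := by
  match t with
  | [] => rw [bp_nil, bp_nil]
  | [b] =>
    rw [bp_true_eq [b] (by simp)]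
    simp [bp_cons_false, bp_nil]
  | x :: y :: r => simp at h

theorem canon_nil : canon [] = [] := by
  rw [canon]
  split
  next mx' mn' hm' hn' =>
    rw [(PySem.List.max?_eq_none_iff ([] : List Int) (fun y => y)).mpr rfl] at hm'
    cases hm'
  next => rfl

theorem canon_eq {arr : List Int} {mx mn : Int}
    (hm : PySem.List.max? arr (fun y => y) = some mx)
    (hn : PySem.List.min? arr (fun y => y) = some mn) :
    canon arr = if (arr.erase mx).length > 1 then mx :: mn :: canon ((arr.erase mx).erase mn)
                else mx :: canon (arr.erase mx) := by
  rw [canon]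
  split
  next mx' mn' hm' hn' =>
    rw [hm] at hm'; rw [hn] at hn'
    cases hm'; cases hn'
    split_ifs with h1
    · rfl
    · rfl
  next h => exact (h mx mn hm hn).elim

theorem all_eq_of_minmax {arr : List Int} {mx mn : Int}
    (hm : PySem.List.max? arr (fun y => y) = some mx)
    (hn : PySem.List.min? arr (fun y => y) = some mn)
    (heq : mn = mx) : ∀ y ∈ arr, y = mn := by
  intro y hy
  have h1 := PySem.List.max?_isMax hm y hy
  have h2 := PySem.List.min?_isMin hn y hy
  simp only at h1 h2
  omega

-- the min that A looks up is still present after A removes the max, whenever > 1 elements remain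
theorem min_mem_erase_max {arr : List Int} {mx mn : Int}
    (hm : PySem.List.max? arr (fun y => y) = some mx)
    (hn : PySem.List.min? arr (fun y => y) = some mn)
    (hlen : (arr.erase mx).length > 1) : mn ∈ arr.erase mx := by
  by_cases hne : mn = mx
  · have hall := all_eq_of_minmax hm hn hne
    have hne' : arr.erase mx ≠ [] := by
      intro h; rw [h] at hlen; simp at hlen
    obtain ⟨z, rest, hzr⟩ := List.exists_cons_of_ne_nil hne'
    have hz : z ∈ arr.erase mx := by rw [hzr]; exact List.mem_cons_self
    have hzmn : z = mn := hall z (List.mem_of_mem_erase hz)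
    rw [← hzmn]; exact hz
  · exact (List.mem_erase_of_ne hne).mpr (PySem.List.min?_mem hn)

theorem solveLoop_nil (ans : List Int) : solveLoop [] ans = ans := by
  rw [solveLoop]; simp

theorem solveLoop_eq {arr : List Int} {mx mn : Int} (ans : List Int)
    (hlen : arr.length > 0)
    (hm : PySem.List.max? arr (fun y => y) = some mx)
    (hn : PySem.List.min? arr (fun y => y) = some mn) :
    solveLoop arr ans =
      if (arr.erase mx).length > 1 then
        solveLoop ((arr.erase mx).erase mn) (ans ++ [mx] ++ [mn])
      else solveLoop (arr.erase mx) (ans ++ [mx]) := by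
  have hmem : mx ∈ arr := PySem.List.max?_mem hm
  rw [solveLoop, dif_pos hlen]
  split
  next mx' mn' hm' hn' =>
    rw [hm] at hm'; rw [hn] at hn'
    cases hm'; cases hn'
    split
    next arr1 heq =>
      obtain ⟨_, rfl⟩ := pvRemoveEq heq
      split_ifs with h1
      · split
        next arr2 heq2 =>
          obtain ⟨_, rfl⟩ := pvRemoveEq heq2
          rfl
        next heq2 =>
          exact ((PySem.List.remove?_eq_none_iff _ _).mp heq2 (min_mem_erase_max hm hn h1)).elim
      · rfl
    next heq =>
      exact ((PySem.List.remove?_eq_none_iff _ _).mp heq hmem).elim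
  next h => exact (h mx mn hm hn).elim

theorem solveLoop_eq_canon_aux :
    ∀ (n : Nat) (arr ans : List Int), arr.length ≤ n → solveLoop arr ans = ans ++ canon arr := by
  intro n
  induction n with
  | zero =>
    intro arr ans hlen
    have : arr = [] := by cases arr <;> simp_all
    subst this
    rw [solveLoop_nil, canon_nil]
    simp
  | succ n IH =>
    intro arr ans hlen
    match arr with
    | [] => rw [solveLoop_nil, canon_nil]; simp
    | a :: rest =>
      have hlen0 : (a :: rest).length > 0 := by simp
      obtain ⟨mx, hm⟩ : ∃ mx, PySem.List.max? (a :: rest) (fun y => y) = some mx := by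
        cases hmx : PySem.List.max? (a :: rest) (fun y => y) with
        | none => exact absurd ((PySem.List.max?_eq_none_iff _ _).mp hmx) (by simp)
        | some v => exact ⟨v, rfl⟩
      obtain ⟨mn, hn⟩ : ∃ mn, PySem.List.min? (a :: rest) (fun y => y) = some mn := by
        cases hmn : PySem.List.min? (a :: rest) (fun y => y) with
        | none => exact absurd ((PySem.List.min?_eq_none_iff _ _).mp hmn) (by simp)
        | some v => exact ⟨v, rfl⟩
      have hmem : mx ∈ a :: rest := PySem.List.max?_mem hm
      have he1 : ((a :: rest).erase mx).length + 1 = (a :: rest).length := by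
        have := List.length_erase_of_mem hmem
        have := List.length_pos_of_mem hmem
        omega
      rw [solveLoop_eq ans hlen0 hm hn, canon_eq hm hn]
      split_ifs with h1
      · rw [IH]
        · simp
        · have := List.length_erase_le (l := (a :: rest).erase mx) (a := mn)
          simp at hlen he1 ⊢
          omega
      · rw [IH]
        · simp
        · simp at hlen he1 ⊢
          omega

theorem solveLoop_eq_canon (arr ans : List Int) : solveLoop arr ans = ans ++ canon arr :=
  solveLoop_eq_canon_aux arr.length arr ans le_rfl

-- erasing the maximum value from a sorted list drops its last element, which is that maximum
theorem erase_max_sorted : ∀ (s : List Int) (mx : Int), s.Pairwise (· ≤ ·) → mx ∈ s →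
    (∀ z ∈ s, z ≤ mx) → s.erase mx = s.dropLast ∧ s.getLast? = some mx := by
  intro s
  induction s with
  | nil => intro mx _ hmem _; simp at hmem
  | cons x t IHt =>
    intro mx hpw hmem hbound
    match t with
    | [] =>
      have : mx = x := by simpa using hmem
      subst this
      simp
    | y :: t' =>
      by_cases hx : x = mx
      · subst hx
        have hall : ∀ z ∈ x :: y :: t', z = x := by
          intro z hz
          have h1 := hbound z hz
          have h2 : ∀ w ∈ y :: t', x ≤ w := (List.pairwise_cons.mp hpw).1
          rcases hz with _ | hz'
          · rfl
          · have := h2 z (by assumption)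
            omega
        have hy : y = x := hall y (by simp)
        constructor
        · simp only [List.erase_cons_head]
          have h1 : y :: t' = List.replicate (t'.length + 1) x := by
            simpa using List.eq_replicate_of_mem
              (fun b hb => hall b (List.mem_cons_of_mem _ hb))
          have h3 : (x :: y :: t').dropLast = x :: (y :: t').dropLast := by
            rw [List.dropLast_eq_take, List.dropLast_eq_take]
            simp [List.take_succ_cons]
          have h4 : (y :: t').dropLast = List.replicate t'.length x := by
            simpa using List.eq_replicate_of_mem (a := x) (l := (y :: t').dropLast)
              (fun b hb => hall b (List.mem_cons_of_mem _ ((List.dropLast_sublist _).subset hb)))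
          rw [h3, h4, h1]
          simp [List.replicate_succ]
        · have hIH := IHt x (List.pairwise_cons.mp hpw).2
            (by rw [← hy]; exact List.mem_cons_self)
            (fun z hz => hbound z (List.mem_cons_of_mem _ hz))
          rw [List.getLast?_cons_cons]
          exact hIH.2
      · have hmx : mx ∈ y :: t' := by
          rcases hmem with _ | hmem'
          · exact absurd rfl hx
          · assumption
        have hIH := IHt mx (List.pairwise_cons.mp hpw).2 hmx
          (fun z hz => hbound z (List.mem_cons_of_mem _ hz))
        constructor
        · rw [List.erase_cons_tail (by simp [hx])]
          rw [hIH.1]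
          rw [List.dropLast_eq_take, List.dropLast_eq_take]
          simp [List.take_succ_cons]
        · rw [List.getLast?_cons_cons]
          exact hIH.2

theorem sorted_nil_id : PySem.List.sorted ([] : List Int) (fun y => y) false = [] :=
  (PySem.List.sorted_eq_nil_iff _ _ _).mpr rfl

theorem canon_eq_bp_aux : ∀ (n : Nat) (arr : List Int), arr.length ≤ n →
    canon arr = bp (PySem.List.sorted arr (fun y => y) false) true := by
  intro n
  induction n with
  | zero =>
    intro arr hlen
    have : arr = [] := by cases arr <;> simp_all
    subst this
    rw [canon_nil, sorted_nil_id, bp_nil]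
  | succ n IH =>
    intro arr hlen
    match arr with
    | [] => rw [canon_nil, sorted_nil_id, bp_nil]
    | a :: rest =>
      obtain ⟨mx, hm⟩ : ∃ mx, PySem.List.max? (a :: rest) (fun y => y) = some mx := by
        cases hmx : PySem.List.max? (a :: rest) (fun y => y) with
        | none => exact absurd ((PySem.List.max?_eq_none_iff _ _).mp hmx) (by simp)
        | some v => exact ⟨v, rfl⟩
      obtain ⟨mn, hn⟩ : ∃ mn, PySem.List.min? (a :: rest) (fun y => y) = some mn := by
        cases hmn : PySem.List.min? (a :: rest) (fun y => y) with
        | none => exact absurd ((PySem.List.min?_eq_none_iff _ _).mp hmn) (by simp)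
        | some v => exact ⟨v, rfl⟩
      set s := PySem.List.sorted (a :: rest) (fun y => y) false with hs
      have hsperm : s.Perm (a :: rest) := PySem.List.sorted_perm _ _ _
      have hsp : s.Pairwise (· ≤ ·) := PySem.List.sorted_pairwise (a :: rest) (fun y => y)
      have hmxs : mx ∈ s := (PySem.List.mem_sorted _ _ _ _).mpr (PySem.List.max?_mem hm)
      have hbound : ∀ z ∈ s, z ≤ mx := fun z hz =>
        PySem.List.max?_isMax hm z ((PySem.List.mem_sorted _ _ _ _).mp hz)
      obtain ⟨her, hlast⟩ := erase_max_sorted s mx hsp hmxs hbound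
      have hmem : mx ∈ a :: rest := PySem.List.max?_mem hm
      have hlen1 : ((a :: rest).erase mx).length + 1 = (a :: rest).length := by
        have := List.length_erase_of_mem hmem
        have := List.length_pos_of_mem hmem
        omega
      simp only [List.length_cons] at hlen1
      have hslen : s.length = (a :: rest).length := hsperm.length_eq
      simp only [List.length_cons] at hslen
      have harr1 : PySem.List.sorted ((a :: rest).erase mx) (fun y => y) false = s.dropLast := by
        apply PySem.List.sorted_id_eq_of_perm_of_pairwise
        · rw [← her]
          exact hsperm.erase mx
        · exact List.Pairwise.sublist (List.dropLast_sublist s) hsp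
      have hsne : s ≠ [] := by
        rw [hs, Ne, PySem.List.sorted_eq_nil_iff]; simp
      have hgl : s.getLast hsne = mx := by
        have h := List.getLast?_eq_getLast hsne
        rw [hlast] at h
        exact (Option.some.injEq _ _).mp h.symm
      have hdl : s.dropLast.length = ((a :: rest).erase mx).length := by
        rw [List.length_dropLast]
        omega
      rw [canon_eq hm hn, bp_true_eq s hsne, hgl]
      split_ifs with h1
      · -- at least two elements remain after removing the max
        obtain ⟨y', ys', hys⟩ := List.exists_cons_of_ne_nil
          (show s.dropLast ≠ [] by intro hc; rw [hc] at hdl; simp at hdl; omega)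
        obtain ⟨z, zs, hzs⟩ := List.exists_cons_of_ne_nil hsne
        have hzy : z = y' ∧ s.dropLast = z :: zs.dropLast := by
          have hzsne : zs ≠ [] := by
            intro hc; rw [hzs, hc] at hdl; simp at hdl; omega
          have hd3 : s.dropLast = z :: zs.dropLast := by
            rw [hzs, List.dropLast_eq_take, List.dropLast_eq_take]
            obtain ⟨k, hk⟩ : ∃ k, zs.length = k + 1 :=
              ⟨zs.length - 1, by have := List.length_pos_of_ne_nil hzsne; omega⟩
            simp only [List.length_cons]
            rw [Nat.add_sub_cancel, hk, List.take_succ_cons, Nat.add_sub_cancel]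
          rw [hd3] at hys
          exact ⟨((List.cons.injEq _ _ _ _).mp hys).1, hd3⟩
        have hmny : mn = y' := by
          have hmn_le : mn ≤ y' := by
            apply PySem.List.min?_isMin hn
            have : y' ∈ s.dropLast := by rw [hys]; exact List.mem_cons_self
            exact (PySem.List.mem_sorted _ _ _ _).mp ((List.dropLast_sublist s).subset this)
          have hy_le : y' ≤ mn := by
            have hz_le : ∀ w ∈ zs, z ≤ w := (List.pairwise_cons.mp (hzs ▸ hsp)).1
            have hmns : mn ∈ s := (PySem.List.mem_sorted _ _ _ _).mpr (PySem.List.min?_mem hn)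
            rw [hzs] at hmns
            rw [← hzy.1]
            rcases hmns with _ | hmns'
            · omega
            · exact hz_le mn (by assumption)
          omega
        rw [hys, bp_cons_false, ← hmny]
        have hperm1 : (mn :: ys').Perm ((a :: rest).erase mx) := by
          rw [← hmny] at hys
          rw [← hys, ← harr1]
          exact PySem.List.sorted_perm _ _ _
        have hsorted2 : PySem.List.sorted (((a :: rest).erase mx).erase mn) (fun y => y) false = ys' := by
          apply PySem.List.sorted_id_eq_of_perm_of_pairwise
          · have := hperm1.erase mn
            rw [List.erase_cons_head] at this
            exact this
          · have : (mn :: ys').Pairwise (· ≤ ·) := by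
              rw [hmny, ← hys]
              exact List.Pairwise.sublist (List.dropLast_sublist s) hsp
            exact (List.pairwise_cons.mp this).2
        congr 2
        rw [← hsorted2]
        apply IH
        have := List.length_erase_le (l := (a :: rest).erase mx) (a := mn)
        simp at hlen
        omega
      · -- at most one element remains after removing the max
        congr 1
        rw [IH ((a :: rest).erase mx) (by simp at hlen; omega), harr1]
        exact (bp_small s.dropLast (by omega)).symm


theorem canon_eq_bp (arr : List Int) :
    canon arr = bp (PySem.List.sorted arr (fun y => y) false) true :=
  canon_eq_bp_aux arr.length arr le_rfl

theorem seg_len (s : List Int) (l h : Nat) (hh : h ≤ s.length) :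
    ((s.drop l).take (h - l)).length = h - l := by
  simp [List.length_take, List.length_drop]
  omega

theorem seg_getLast (s : List Int) (l h : Nat) (hlh : l < h) (hh : h ≤ s.length)
    (hne : (s.drop l).take (h - l) ≠ []) :
    ((s.drop l).take (h - l)).getLast hne = s[h-1]'(by omega) := by
  rw [List.getLast_eq_getElem]
  simp only [List.getElem_take, List.getElem_drop]
  congr 1
  rw [seg_len s l h hh]
  omega

theorem seg_dropLast (s : List Int) (l h : Nat) (hh : h ≤ s.length) :
    ((s.drop l).take (h - l)).dropLast = (s.drop l).take (h - 1 - l) := by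
  rw [List.dropLast_eq_take, List.take_take]
  congr 1
  rw [seg_len s l h hh]
  omega

theorem seg_cons (s : List Int) (l h : Nat) (hlh : l < h) (hh : h ≤ s.length) :
    (s.drop l).take (h - l) = s[l]'(by omega) :: (s.drop (l+1)).take (h - (l+1)) := by
  have hd : s.drop l = s[l]'(by omega) :: s.drop (l+1) := (List.getElem_cons_drop (by omega)).symm
  rw [hd]
  obtain ⟨k, hk⟩ : ∃ k, h - l = k + 1 := ⟨h - l - 1, by omega⟩
  rw [hk, List.take_succ_cons]
  have hk2 : k = h - (l + 1) := by omega
  rw [hk2]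

theorem solveAltLoop_eq_bp_aux : ∀ (n : Nat) (s : List Int) (l h : Nat) (tm : Bool) (ans : List Int),
    h - l ≤ n → l ≤ h → h ≤ s.length →
    solveAltLoop s (l : Int) ((h : Int) - 1) tm ans = ans ++ bp ((s.drop l).take (h - l)) tm := by
  intro n
  induction n with
  | zero =>
    intro s l h tm ans hfuel hl hh
    have hlh : l = h := by omega
    subst hlh
    rw [solveAltLoop, dif_neg (by omega)]
    simp [bp_nil]
  | succ n IH =>
    intro s l h tm ans hfuel hl hh
    by_cases hlh : l = h
    · subst hlh
      rw [solveAltLoop, dif_neg (by omega)]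
      simp [bp_nil]
    · have hlt : l < h := by omega
      rw [solveAltLoop, dif_pos (by omega)]
      cases tm with
      | true =>
        have hid : (h : Int) - 1 = ((h - 1 : Nat) : Int) := by omega
        have hget : PySem.List.pyGet? s ((h : Int) - 1) = some (s[h-1]'(by omega)) := by
          rw [hid, PySem.List.pyGet?_natCast]
          exact List.getElem?_eq_getElem (by omega)
        simp only [if_true, hget, Bool.not_true]
        have hrec : (h : Int) - 1 - 1 = ((h - 1 : Nat) : Int) - 1 := by omega
        rw [hrec, IH s l (h-1) false (ans ++ [s[h-1]'(by omega)]) (by omega) (by omega) (by omega)]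
        rw [bp_true_eq _ (by
          have := seg_len s l h hh
          intro hc; rw [hc] at this; simp at this; omega)]
        rw [seg_getLast s l h hlt hh, seg_dropLast s l h hh]
        have : h - 1 - l = h - l - 1 := by omega
        simp [this]
      | false =>
        have hget : PySem.List.pyGet? s (l : Int) = some (s[l]'(by omega)) := by
          rw [PySem.List.pyGet?_natCast]
          exact List.getElem?_eq_getElem (by omega)
        simp only [Bool.false_eq_true, if_false, hget, Bool.not_false]
        have hrec : (l : Int) + 1 = ((l + 1 : Nat) : Int) := by omega
        rw [hrec, IH s (l+1) h true (ans ++ [s[l]'(by omega)]) (by omega) (by omega) (by omega)]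
        rw [seg_cons s l h hlt hh, bp_cons_false]
        simp

theorem solveAltLoop_eq_bp (s : List Int) (l h : Nat) (tm : Bool) (ans : List Int)
    (hl : l ≤ h) (hh : h ≤ s.length) :
    solveAltLoop s (l : Int) ((h : Int) - 1) tm ans = ans ++ bp ((s.drop l).take (h - l)) tm :=
  solveAltLoop_eq_bp_aux (h - l) s l h tm ans le_rfl hl hh

-- ===== VERDICT (by name: the statement is the Claim_ definition above) =====
theorem solve_spec : Claim_equal_solve := by
  intro arr _ 
  unfold Spec_solve solve solve_alt
  rw [solveLoop_eq_canon, canon_eq_bp]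
  have h := solveAltLoop_eq_bp (PySem.List.sorted arr (fun y => y) false) 0
      (PySem.List.sorted arr (fun y => y) false).length true [] (Nat.zero_le _) le_rfl
  simp only [List.drop_zero, List.take_length, Nat.sub_zero, Nat.cast_zero, List.nil_append] at h
  simp only [List.nil_append]
  exact h.symm
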